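-- pv_equiv track=rewrite | github.com/clockback/wordmuncher | prokart/src/modules/sql_handler.py | invert_answers
-- ===== SOURCE A (Python) =====
-- from typing import Dict, List, Optional, Tuple, Union
--
-- def invert_answers(
--         answers: Dict[str, Dict[str, str]]
-- ) -> Dict[str, Dict[str, str]]:
--     """Inverts the answers for when a subschema swap occurs.
--     :param Dict[str, Dict[str, str]] answers:
--     :return: The inverted answers.
--     """
--     inverted = {}
--     for column in answers:
--         if column == 'name':
--             continue
--
--         for row in answers[column]:
--             if row not in inverted:
--                 inverted[row] = {}
--             inverted[row][column] = answers[column][row]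
--
--     return inverted
-- ===== SOURCE B (Python) =====
-- def invert_answers(answers):
--     """Row-first transpose: collect the distinct row keys in first-appearance
--     order, then build each row's inner dict by scanning the columns."""
--     columns = [(c, m) for c, m in answers.items() if c != 'name']
--     rows = []
--     seen = set()
--     for _, m in columns:
--         for r in m:
--             if r not in seen:
--                 seen.add(r)
--                 rows.append(r)
--     return {r: {c: m[r] for c, m in columns if r in m} for r in rows}
-- ===== Notes on version B (the rewrite author's own statement) =====
-- stated objective: alternative
-- what changed: B inverts the nesting: it first collects all distinct row keys in first-appearance order across the non-'name' columns, then builds the result row-by-row with the columns as the inner scan, instead of A's column-by-column mutation of a growing nested dict; Pre_ only requires the association lists to have distinct keys at both levels, i.e. to actually represent Python dicts.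
import Mathlib
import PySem

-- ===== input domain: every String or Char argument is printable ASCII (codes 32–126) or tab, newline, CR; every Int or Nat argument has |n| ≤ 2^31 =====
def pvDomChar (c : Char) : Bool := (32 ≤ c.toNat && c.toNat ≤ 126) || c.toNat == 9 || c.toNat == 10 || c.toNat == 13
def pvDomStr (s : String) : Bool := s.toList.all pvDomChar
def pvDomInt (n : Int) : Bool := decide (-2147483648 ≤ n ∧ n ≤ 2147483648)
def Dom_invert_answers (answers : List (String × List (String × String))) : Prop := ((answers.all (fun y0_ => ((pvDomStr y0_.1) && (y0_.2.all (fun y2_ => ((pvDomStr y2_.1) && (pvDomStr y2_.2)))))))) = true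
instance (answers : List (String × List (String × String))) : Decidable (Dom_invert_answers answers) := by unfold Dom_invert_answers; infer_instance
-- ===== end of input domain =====

-- B builds the same transposed dict row-first (distinct row keys in first-appearance order,
-- then columns as the inner scan) instead of A's column-first mutation of a nested dict;
-- same cost, different decomposition (objective: alternative).

-- ===== PORT A =====
def invert_answers (answers : List (String × List (String × String))) : List (String × List (String × String)) :=
  let inverted : PySem.Dict String (PySem.Dict String String) :=
    answers.foldl (fun inverted p =>
      if p.1 == "name" then inverted
      else p.2.foldl (fun inv q =>
        let inv2 := if inv.contains q.1 then inv else inv.insert q.1 PySem.Dict.empty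
        inv2.modify q.1 PySem.Dict.empty (fun m => m.insert p.1 q.2)) inverted)
      PySem.Dict.empty
  inverted.items.map (fun r => (r.1, r.2.items))

-- ===== PORT B =====
def invert_answers_alt (answers : List (String × List (String × String))) : List (String × List (String × String)) :=
  let columns := answers.filter (fun p => p.1 != "name")
  let rows : List String :=
    columns.foldl (fun s p => p.2.foldl (fun s q => PySem.Set.add s q.1) s) []
  rows.map (fun r => (r,
    (columns.foldl (fun acc p =>
        match (PySem.Dict.mk p.2).get? r with
        | some v => acc.insert p.1 v
        | none => acc) (PySem.Dict.empty : PySem.Dict String String)).items))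

-- ===== PRECONDITION & SPEC =====
-- Pre_ requires distinct keys at both nesting levels: the association lists must actually
-- represent Python dicts (a Python dict can never hold a duplicate key), which every real
-- input of A satisfies.
def Pre_invert_answers (answers : List (String × List (String × String))) : Prop :=
  (answers.map Prod.fst).Nodup ∧ ∀ p ∈ answers, (p.2.map Prod.fst).Nodup
instance (answers : List (String × List (String × String))) : Decidable (Pre_invert_answers answers) := by unfold Pre_invert_answers; infer_instance

def pvWitness_invert_answers : (List (String × List (String × String))) :=
  [("name", [("x", "1")]), ("col1", [("r1", "a"), ("r2", "b")]), ("col2", [("r2", "c")])]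

def Spec_invert_answers (answers : List (String × List (String × String))) (out : List (String × List (String × String))) : Prop := out = invert_answers_alt answers
instance (answers : List (String × List (String × String))) (out : List (String × List (String × String))) : Decidable (Spec_invert_answers answers out) := by unfold Spec_invert_answers; infer_instance

-- ===== CLAIM (what is proved, stated in full; the proofs are below) =====
def Claim_equal_invert_answers : Prop := ∀ (answers : List (String × List (String × String))), Dom_invert_answers answers → Pre_invert_answers answers → Spec_invert_answers answers (invert_answers answers)

-- ===== LEMMAS AND PROOFS =====

-- A's inner loop body (processing one cell of column c).
def colStep (c : String) (inv : PySem.Dict String (PySem.Dict String String)) (q : String × String) : PySem.Dict String (PySem.Dict String String) :=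
  let inv2 := if inv.contains q.1 then inv else inv.insert q.1 PySem.Dict.empty
  inv2.modify q.1 PySem.Dict.empty (fun m => m.insert c q.2)

-- The contribution of column (c, m) to row r: [(c, m[r])] if r ∈ m, else [].
def optCol (c : String) (m : List (String × String)) (r : String) : List (String × String) :=
  match (PySem.Dict.mk m).get? r with
  | some v => [(c, v)]
  | none => []

def rowsOf (cols : List (String × List (String × String))) : List String :=
  cols.foldl (fun s p => p.2.foldl (fun s q => PySem.Set.add s q.1) s) []

def innerOf (cols : List (String × List (String × String))) (r : String) : List (String × String) :=
  cols.flatMap (fun p => optCol p.1 p.2 r)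

lemma optCol_cons_self (c : String) (r v : String) (m : List (String × String)) :
    optCol c ((r, v) :: m) r = [(c, v)] := by
  simp [optCol, PySem.Dict.get?_mk_cons]

lemma optCol_cons_ne (c : String) (r v r' : String) (m : List (String × String)) (h : r' ≠ r) :
    optCol c ((r, v) :: m) r' = optCol c m r' := by
  simp [optCol, PySem.Dict.get?_mk_cons, (by simpa using h.symm : (r == r') = false)]

lemma optCol_eq_nil_of_not_mem (c : String) (m : List (String × String)) (r : String)
    (h : r ∉ m.map Prod.fst) : optCol c m r = [] := by
  have : (PySem.Dict.mk m).get? r = none := by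
    rw [PySem.Dict.get?_eq_none_iff_not_mem_keys]; simpa [PySem.Dict.keys_mk] using h
  simp [optCol, this]

lemma optCol_keys (c : String) (m : List (String × String)) (r x : String)
    (h : x ∈ (optCol c m r).map Prod.fst) : x = c := by
  unfold optCol at h
  cases hg : (PySem.Dict.mk m).get? r <;> simp [hg] at h
  exact h

-- A's fold with the "name" skip equals the same fold over the filtered columns.
lemma skip_eq_filter (l : List (String × List (String × String)))
    (I : PySem.Dict String (PySem.Dict String String)) :
    l.foldl (fun inv p => if p.1 == "name" then inv else p.2.foldl (colStep p.1) inv) I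
      = (l.filter (fun p => p.1 != "name")).foldl (fun inv p => p.2.foldl (colStep p.1) inv) I := by
  induction l generalizing I with
  | nil => rfl
  | cons p t ih =>
    by_cases h : p.1 = "name"
    · have hb : (p.1 == "name") = true := by simpa using h
      simp only [List.foldl_cons, List.filter_cons, hb, bne, Bool.not_true, if_true]
      exact ih I
    · have hb : (p.1 == "name") = false := by simpa using h
      simp only [List.foldl_cons, List.filter_cons, hb, bne, Bool.not_false, if_true]
      exact ih _

-- Processing one whole column (c, m) on a nodup-keyed dict I.
lemma colfold_items (c : String) (m : List (String × String))
    (I : PySem.Dict String (PySem.Dict String String))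
    (hm : (m.map Prod.fst).Nodup) (hI : I.keys.Nodup)
    (hc : ∀ p ∈ I.items, p.1 ∈ m.map Prod.fst → p.2.contains c = false) :
    (m.foldl (colStep c) I).items =
      I.items.map (fun p => (p.1, PySem.Dict.mk (p.2.items ++ optCol c m p.1)))
      ++ (m.filter (fun q => !(I.contains q.1))).map (fun q => (q.1, PySem.Dict.mk [(c, q.2)])) := by
  induction m generalizing I with
  | nil =>
    rw [List.foldl_nil, List.filter_nil, List.map_nil, List.append_nil]
    conv_lhs => rw [← List.map_id I.items]
    apply List.map_congr_left
    intro p _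
    show p = (p.1, PySem.Dict.mk (p.2.items ++ optCol c [] p.1))
    rw [show optCol c [] p.1 = [] from rfl, List.append_nil]
  | cons q m' ih =>
    obtain ⟨r, v⟩ := q
    rw [List.map_cons, List.nodup_cons] at hm
    have hr : r ∉ m'.map Prod.fst := hm.1
    have hm' : (m'.map Prod.fst).Nodup := hm.2
    rw [List.foldl_cons]
    by_cases hcont : I.contains r = true
    · -- row r already present: modify it in place
      obtain ⟨p₀, hp₀, hfst⟩ : ∃ p ∈ I.items, p.1 = r := by
        have := (PySem.Dict.contains_iff_mem_keys I r).mp hcont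
        simpa [PySem.Dict.keys, List.mem_map] using this
      have hgd : I.getD r PySem.Dict.empty = p₀.2 := by
        have : (r, p₀.2) ∈ I.items := by rw [← hfst]; exact hp₀
        exact PySem.Dict.getD_of_mem_items I this hI _
      have hstep : colStep c I (r, v) = I.insert r (p₀.2.insert c v) := by
        simp [colStep, hcont, PySem.Dict.modify, hgd]
      rw [hstep]
      have hcw : p₀.2.contains c = false := hc p₀ hp₀ (by simp [hfst])
      have hkeys' : (I.insert r (p₀.2.insert c v)).keys.Nodup := by
        rw [PySem.Dict.keys_insert_of_contains I _ hcont]; exact hI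
      have hitems' : (I.insert r (p₀.2.insert c v)).items
          = I.items.map (fun p => if p.1 == r then (r, p₀.2.insert c v) else p) :=
        PySem.Dict.items_insert_of_contains I _ hcont
      have hc' : ∀ p ∈ (I.insert r (p₀.2.insert c v)).items, p.1 ∈ m'.map Prod.fst → p.2.contains c = false := by
        intro p hp hpm
        rw [hitems'] at hp
        obtain ⟨p₁, hp₁, rfl⟩ := List.mem_map.mp hp
        by_cases hb : p₁.1 = r
        · exfalso
          simp only [hb, beq_self_eq_true, if_true] at hpm ⊢
          exact hr hpm
        · have hbne : (p₁.1 == r) = false := by simpa using hb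
          simp only [hbne, Bool.false_eq_true, if_false] at hpm ⊢
          exact hc p₁ hp₁ (by simp [hpm])
      rw [ih _ hm' hkeys' hc']
      have hinj := List.inj_on_of_nodup_map (f := Prod.fst) (by simpa [PySem.Dict.keys] using hI)
      congr 1
      · -- first chunk
        rw [hitems', List.map_map]
        apply List.map_congr_left
        intro p hp
        by_cases hb : p.1 = r
        · have hpp : p = p₀ := hinj hp hp₀ (by rw [hb, hfst])
          have hbb : (p.1 == r) = true := by simpa using hb
          simp only [Function.comp, hbb, if_true]
          rw [optCol_eq_nil_of_not_mem c m' r hr,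
              PySem.Dict.items_insert_of_not_contains _ _ hcw]
          subst hpp
          rw [hb, optCol_cons_self]
          simp
        · have hbb : (p.1 == r) = false := by simpa using hb
          simp only [Function.comp, hbb, Bool.false_eq_true, if_false]
          rw [optCol_cons_ne c r v p.1 m' hb]
      · -- second chunk
        have hIc : (!(I.contains r)) = false := by simp [hcont]
        rw [List.filter_cons, hIc]
        simp only [Bool.false_eq_true, if_false]
        apply congrArg
        apply List.filter_congr
        intro q hq
        have hqr : (q.1 == r) = false := by
          have : q.1 ≠ r := by
            rintro rfl
            exact hr (List.mem_map.mpr ⟨q, hq, rfl⟩)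
          simpa using this
        rw [PySem.Dict.contains_insert, hqr, Bool.false_or]
    · -- row r is new: append it
      have hcf : I.contains r = false := by simpa using hcont
      have hrk : r ∉ I.keys := by
        intro h; exact hcont ((PySem.Dict.contains_iff_mem_keys I r).mpr h)
      have hstep : colStep c I (r, v) = I.insert r (PySem.Dict.mk [(c, v)]) := by
        simp only [colStep, hcf, Bool.false_eq_true, if_false, PySem.Dict.modify]
        rw [PySem.Dict.getD_insert_self, PySem.Dict.insert_insert_self]
        have hev : PySem.Dict.empty.insert c v = PySem.Dict.mk [(c, v)] := by
          apply PySem.Dict.ext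
          rw [PySem.Dict.items_insert_of_not_contains _ _ (PySem.Dict.contains_empty c)]
          rfl
        rw [hev]
      rw [hstep]
      have hitems₂ : (I.insert r (PySem.Dict.mk [(c, v)])).items
          = I.items ++ [(r, PySem.Dict.mk [(c, v)])] :=
        PySem.Dict.items_insert_of_not_contains I _ hcf
      have hkeys₂ : (I.insert r (PySem.Dict.mk [(c, v)])).keys.Nodup := by
        rw [PySem.Dict.keys_insert_of_not_contains I _ hcf]
        simp only [List.nodup_append, List.nodup_cons, List.not_mem_nil, not_false_iff, List.nodup_nil, and_true, true_and]
        refine ⟨hI, ?_⟩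
        intro a ha b hb
        simp only [List.mem_singleton] at hb
        subst hb
        rintro rfl
        exact hrk ha
      have hc₂ : ∀ p ∈ (I.insert r (PySem.Dict.mk [(c, v)])).items, p.1 ∈ m'.map Prod.fst → p.2.contains c = false := by
        intro p hp hpm
        rw [hitems₂] at hp
        rcases List.mem_append.mp hp with hp | hp
        · exact hc p hp (by simp [hpm])
        · simp only [List.mem_singleton] at hp
          subst hp
          exact absurd hpm hr
      rw [ih _ hm' hkeys₂ hc₂, hitems₂]
      have hIfst : ∀ p ∈ I.items, p.1 ≠ r := by
        intro p hp hpr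
        exact hrk (by simp only [PySem.Dict.keys]; exact List.mem_map.mpr ⟨p, hp, hpr⟩)
      rw [List.map_append]
      have hmapeq : I.items.map (fun p => (p.1, PySem.Dict.mk (p.2.items ++ optCol c m' p.1)))
          = I.items.map (fun p => (p.1, PySem.Dict.mk (p.2.items ++ optCol c ((r, v) :: m') p.1))) := by
        apply List.map_congr_left
        intro p hp
        rw [optCol_cons_ne c r v p.1 m' (hIfst p hp)]
      rw [hmapeq]
      have hfiltc : ((r, v) :: m').filter (fun q => !(I.contains q.1))
          = (r, v) :: m'.filter (fun q => !(I.contains q.1)) := by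
        rw [List.filter_cons]
        simp [hcf]
      rw [hfiltc]
      have hfilt₂ : m'.filter (fun q => !((I.insert r (PySem.Dict.mk [(c, v)])).contains q.1))
          = m'.filter (fun q => !(I.contains q.1)) := by
        apply List.filter_congr
        intro q hq
        have hqr : (q.1 == r) = false := by
          have : q.1 ≠ r := by
            rintro rfl
            exact hr (List.mem_map.mpr ⟨q, hq, rfl⟩)
          simpa using this
        rw [PySem.Dict.contains_insert, hqr, Bool.false_or]
      rw [hfilt₂]
      have hsingle : [(r, PySem.Dict.mk [(c, v)])].map (fun p => (p.1, PySem.Dict.mk (p.2.items ++ optCol c m' p.1)))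
          = [(r, PySem.Dict.mk [(c, v)])] := by
        simp only [List.map_cons, List.map_nil]
        rw [optCol_eq_nil_of_not_mem c m' r hr]
        simp
      rw [hsingle, List.map_cons]
      rw [List.append_assoc]
      rfl

lemma mem_rowsOf_aux (cols : List (String × List (String × String))) (s : List String) (r : String) :
    r ∈ cols.foldl (fun s p => p.2.foldl (fun s q => PySem.Set.add s q.1) s) s
      ↔ r ∈ s ∨ ∃ p ∈ cols, r ∈ p.2.map Prod.fst := by
  induction cols generalizing s with
  | nil => simp
  | cons p t ih =>
    rw [List.foldl_cons, ih]
    rw [show (p.2.foldl (fun s q => PySem.Set.add s q.1) s)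
        = (p.2.foldl (fun s q => PySem.Set.add s (Prod.fst q)) s) from rfl]
    rw [PySem.Set.mem_foldl_add]
    simp only [List.mem_cons, List.mem_map]
    constructor
    · rintro (⟨h | ⟨b, hb, rfl⟩⟩ | ⟨p', hp', hr⟩)
      · exact Or.inl h
      · exact Or.inr ⟨p, Or.inl rfl, ⟨b, hb, rfl⟩⟩
      · exact Or.inr ⟨p', Or.inr hp', by simpa using hr⟩
    · rintro (h | ⟨p', hp' | hp', hr⟩)
      · exact Or.inl (Or.inl h)
      · subst hp'
        obtain ⟨b, hb, rfl⟩ := hr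
        exact Or.inl (Or.inr ⟨b, hb, rfl⟩)
      · exact Or.inr ⟨p', hp', by simpa using hr⟩

lemma nodup_rowsOf_aux (cols : List (String × List (String × String))) (s : List String)
    (hs : s.Nodup) :
    (cols.foldl (fun s p => p.2.foldl (fun s q => PySem.Set.add s q.1) s) s).Nodup := by
  induction cols generalizing s with
  | nil => exact hs
  | cons p t ih =>
    rw [List.foldl_cons]
    apply ih
    rw [show (p.2.foldl (fun s q => PySem.Set.add s q.1) s)
        = (p.2.foldl (fun s q => PySem.Set.add s (Prod.fst q)) s) from rfl,
      ← PySem.Set.update_map_eq_foldl_add]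
    exact PySem.Set.nodup_update _ _ hs

lemma rowsOf_append_single (cols : List (String × List (String × String)))
    (p : String × List (String × String)) (hp : (p.2.map Prod.fst).Nodup) :
    rowsOf (cols ++ [p])
      = rowsOf cols ++ (p.2.map Prod.fst).filter (fun r => !(PySem.Set.contains (rowsOf cols) r)) := by
  unfold rowsOf
  rw [List.foldl_append, List.foldl_cons, List.foldl_nil]
  rw [show (p.2.foldl (fun s q => PySem.Set.add s q.1)
        (cols.foldl (fun s p => p.2.foldl (fun s q => PySem.Set.add s q.1) s) []))
      = (p.2.foldl (fun s q => PySem.Set.add s (Prod.fst q))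
        (cols.foldl (fun s p => p.2.foldl (fun s q => PySem.Set.add s q.1) s) [])) from rfl,
    ← PySem.Set.update_map_eq_foldl_add]
  rw [PySem.Set.update_eq_append_filter]
  rw [PySem.Set.ofList_eq_self_of_nodup _ hp]

lemma innerOf_append_single (cols : List (String × List (String × String)))
    (p : String × List (String × String)) (r : String) :
    innerOf (cols ++ [p]) r = innerOf cols r ++ optCol p.1 p.2 r := by
  simp [innerOf]

lemma innerOf_eq_nil (cols : List (String × List (String × String))) (r : String)
    (h : ∀ p ∈ cols, r ∉ p.2.map Prod.fst) : innerOf cols r = [] := by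
  unfold innerOf
  rw [List.flatMap_eq_nil_iff]
  intro p hp
  exact optCol_eq_nil_of_not_mem _ _ _ (h p hp)

lemma innerOf_keys (cols : List (String × List (String × String))) (r x : String)
    (h : x ∈ (innerOf cols r).map Prod.fst) : x ∈ cols.map Prod.fst := by
  obtain ⟨q, hq, rfl⟩ := List.mem_map.mp h
  unfold innerOf at hq
  obtain ⟨p, hp, hqp⟩ := List.mem_flatMap.mp hq
  exact List.mem_map.mpr ⟨p, hp, (optCol_keys p.1 p.2 r q.1 (List.mem_map.mpr ⟨q, hqp, rfl⟩)).symm⟩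

lemma filter_map_assoc (c : String) (m : List (String × String)) (P : String → Bool)
    (hm : (m.map Prod.fst).Nodup) :
    (m.filter (fun q => P q.1)).map (fun q => (q.1, PySem.Dict.mk [(c, q.2)]))
      = ((m.map Prod.fst).filter P).map (fun r => (r, PySem.Dict.mk (optCol c m r))) := by
  induction m with
  | nil => simp
  | cons q t ih =>
    obtain ⟨r, v⟩ := q
    rw [List.map_cons, List.nodup_cons] at hm
    have hr : r ∉ t.map Prod.fst := hm.1
    have hcongr : ((t.map Prod.fst).filter P).map (fun r' => (r', PySem.Dict.mk (optCol c t r')))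
        = ((t.map Prod.fst).filter P).map (fun r' => (r', PySem.Dict.mk (optCol c ((r, v) :: t) r'))) := by
      apply List.map_congr_left
      intro x hx
      have hxt : x ∈ t.map Prod.fst := (List.mem_filter.mp hx).1
      rw [optCol_cons_ne c r v x t (by rintro rfl; exact hr hxt)]
    rw [List.map_cons, List.filter_cons, List.filter_cons]
    by_cases hP : P r = true
    · simp only [hP, if_true]
      rw [List.map_cons, List.map_cons, ih hm.2, hcongr, optCol_cons_self]
    · simp only [hP, Bool.false_eq_true, if_false]
      rw [ih hm.2, hcongr]

lemma main_fold (cols : List (String × List (String × String)))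
    (h1 : (cols.map Prod.fst).Nodup) (h2 : ∀ p ∈ cols, (p.2.map Prod.fst).Nodup) :
    (cols.foldl (fun inv p => p.2.foldl (colStep p.1) inv) PySem.Dict.empty).items
      = (rowsOf cols).map (fun r => (r, PySem.Dict.mk (innerOf cols r))) := by
  induction cols using List.reverseRecOn with
  | nil => rfl
  | append_singleton cs p ih =>
    rw [List.map_append, List.nodup_append] at h1
    have h1c : (cs.map Prod.fst).Nodup := h1.1
    have hp1 : p.1 ∉ cs.map Prod.fst := by
      intro hmem
      exact h1.2.2 p.1 hmem p.1 (by simp) rfl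
    have h2c : ∀ q ∈ cs, (q.2.map Prod.fst).Nodup := fun q hq => h2 q (List.mem_append_left _ hq)
    have hpn : (p.2.map Prod.fst).Nodup := h2 p (List.mem_append_right _ (by simp))
    have ihe := ih h1c h2c
    rw [List.foldl_append, List.foldl_cons, List.foldl_nil]
    have hPkeys : (cs.foldl (fun inv p => p.2.foldl (colStep p.1) inv) PySem.Dict.empty).keys = rowsOf cs := by
      show (cs.foldl (fun inv p => p.2.foldl (colStep p.1) inv) PySem.Dict.empty).items.map (fun x => x.1) = rowsOf cs
      rw [ihe, List.map_map]
      show List.map (fun r => r) (rowsOf cs) = rowsOf cs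
      exact List.map_id _
    have hPnd : (cs.foldl (fun inv p => p.2.foldl (colStep p.1) inv) PySem.Dict.empty).keys.Nodup := by
      rw [hPkeys]
      exact nodup_rowsOf_aux cs [] List.nodup_nil
    have hPc : ∀ q ∈ (cs.foldl (fun inv p => p.2.foldl (colStep p.1) inv) PySem.Dict.empty).items,
        q.1 ∈ p.2.map Prod.fst → q.2.contains p.1 = false := by
      intro q hq _
      rw [ihe] at hq
      obtain ⟨r, hr, rfl⟩ := List.mem_map.mp hq
      have hnm : p.1 ∉ (PySem.Dict.mk (innerOf cs r)).keys := by
        rw [PySem.Dict.keys_mk]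
        intro hmem
        exact hp1 (innerOf_keys cs r p.1 hmem)
      cases hcc : (PySem.Dict.mk (innerOf cs r)).contains p.1 with
      | false => rfl
      | true => exact absurd ((PySem.Dict.contains_iff_mem_keys _ _).mp hcc) hnm
    rw [colfold_items p.1 p.2 _ hpn hPnd hPc]
    rw [rowsOf_append_single cs p hpn, List.map_append]
    congr 1
    · rw [ihe, List.map_map]
      apply List.map_congr_left
      intro r _
      show (r, PySem.Dict.mk ((PySem.Dict.mk (innerOf cs r)).items ++ optCol p.1 p.2 r))
          = (r, PySem.Dict.mk (innerOf (cs ++ [p]) r))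
      rw [innerOf_append_single]
    · have hpc : ∀ x, (cs.foldl (fun inv p => p.2.foldl (colStep p.1) inv) PySem.Dict.empty).contains x
          = decide (x ∈ rowsOf cs) := by
        intro x
        rw [PySem.Dict.contains_eq_decide_mem_keys, hPkeys]
      have hL : p.2.filter (fun q => !((cs.foldl (fun inv p => p.2.foldl (colStep p.1) inv) PySem.Dict.empty).contains q.1))
          = p.2.filter (fun q => !(decide (q.1 ∈ rowsOf cs))) := by
        apply List.filter_congr
        intro q _
        rw [hpc]
      rw [hL, filter_map_assoc p.1 p.2 (fun x => !decide (x ∈ rowsOf cs)) hpn]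
      have hR : (p.2.map Prod.fst).filter (fun r => !(PySem.Set.contains (rowsOf cs) r))
          = (p.2.map Prod.fst).filter (fun r => !(decide (r ∈ rowsOf cs))) := by
        apply List.filter_congr
        intro x _
        rw [PySem.Set.contains_eq_decide]
      rw [hR]
      apply List.map_congr_left
      intro r hrr
      have hrn : r ∉ rowsOf cs := by
        have := (List.mem_filter.mp hrr).2
        simpa using this
      have hnil : innerOf cs r = [] := by
        apply innerOf_eq_nil
        intro q hq hmem
        exact hrn ((mem_rowsOf_aux cs [] r).mpr (Or.inr ⟨q, hq, hmem⟩))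
      rw [innerOf_append_single, hnil, List.nil_append]

lemma innerB (r : String) (cols : List (String × List (String × String)))
    (acc : PySem.Dict String String)
    (hnd : (cols.map Prod.fst).Nodup)
    (hacc : ∀ c ∈ cols.map Prod.fst, acc.contains c = false) :
    (cols.foldl (fun acc p =>
        match (PySem.Dict.mk p.2).get? r with
        | some v => acc.insert p.1 v
        | none => acc) acc).items
      = acc.items ++ innerOf cols r := by
  induction cols generalizing acc with
  | nil => simp [innerOf]
  | cons p t ih =>
    rw [List.map_cons, List.nodup_cons] at hnd
    have hinner : innerOf (p :: t) r = optCol p.1 p.2 r ++ innerOf t r := by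
      simp [innerOf]
    rw [List.foldl_cons, hinner]
    cases hg : (PySem.Dict.mk p.2).get? r with
    | none =>
      rw [ih _ hnd.2 (fun c hc => hacc c (by simp [hc]))]
      rw [show optCol p.1 p.2 r = [] by simp [optCol, hg]]
      simp
    | some v =>
      have hp1 : acc.contains p.1 = false := hacc p.1 (by simp)
      have hacc' : ∀ c ∈ t.map Prod.fst, (acc.insert p.1 v).contains c = false := by
        intro c hc
        have hcp : (c == p.1) = false := by
          have : c ≠ p.1 := by rintro rfl; exact hnd.1 hc
          simpa using this
        rw [PySem.Dict.contains_insert, hcp, Bool.false_or]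
        exact hacc c (by simp [hc])
      rw [ih _ hnd.2 hacc',
        PySem.Dict.items_insert_of_not_contains _ _ hp1,
        show optCol p.1 p.2 r = [(p.1, v)] by simp [optCol, hg]]
      simp

-- ===== VERDICT (by name: the statement is the Claim_ definition above) =====
theorem invert_answers_spec : Claim_equal_invert_answers := by
  intro answers _ hpre
  obtain ⟨h1, h2⟩ := hpre
  have hcols1 : ((answers.filter (fun p => p.1 != "name")).map Prod.fst).Nodup :=
    List.Nodup.sublist (List.Sublist.map Prod.fst (List.filter_sublist (l := answers))) h1
  have hcols2 : ∀ p ∈ answers.filter (fun p => p.1 != "name"), (p.2.map Prod.fst).Nodup :=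
    fun p hp => h2 p (List.mem_of_mem_filter hp)
  show invert_answers answers = invert_answers_alt answers
  have hA : invert_answers answers
      = ((answers.filter (fun p => p.1 != "name")).foldl
          (fun inv p => p.2.foldl (colStep p.1) inv) PySem.Dict.empty).items.map
            (fun r => (r.1, r.2.items)) := by
    rw [show invert_answers answers
        = (answers.foldl (fun inv p => if p.1 == "name" then inv else p.2.foldl (colStep p.1) inv)
            PySem.Dict.empty).items.map (fun r => (r.1, r.2.items)) from rfl]
    rw [skip_eq_filter]
  have hB : invert_answers_alt answers
      = (rowsOf (answers.filter (fun p => p.1 != "name"))).map (fun r => (r,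
          ((answers.filter (fun p => p.1 != "name")).foldl (fun acc p =>
            match (PySem.Dict.mk p.2).get? r with
            | some v => acc.insert p.1 v
            | none => acc) PySem.Dict.empty).items)) := rfl
  rw [hA, main_fold _ hcols1 hcols2, List.map_map, hB]
  apply List.map_congr_left
  intro r _
  show (r, (PySem.Dict.mk (innerOf (answers.filter (fun p => p.1 != "name")) r)).items) = _
  rw [innerB r _ PySem.Dict.empty hcols1 (fun c _ => PySem.Dict.contains_empty c)]
  rfl
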